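-- pv_equiv track=rewrite | github.com/voicetreelab/voicetree-evals | metabench/kaggle_submission/verifiers/ve.py | _adjacency_from_scopes
-- ===== SOURCE A (Python) =====
-- from itertools import combinations
-- from typing import Any, Iterable, Sequence
--
-- def _adjacency_from_scopes(scopes: Iterable[set[str]]) -> dict[str, set[str]]:
--     adjacency: dict[str, set[str]] = {}
--     for scope in scopes:
--         for variable_name in scope:
--             adjacency.setdefault(variable_name, set())
--         for left, right in combinations(scope, 2):
--             adjacency[left].add(right)
--             adjacency[right].add(left)
--     return adjacency
-- ===== SOURCE B (Python) =====
-- def _adjacency_from_scopes(scopes):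
--     scopes = list(scopes)
--     variables = dict.fromkeys(v for scope in scopes for v in scope)
--     return {v: {u for s in scopes if v in s for u in s if u != v}
--             for v in variables}
-- ===== Notes on version B (the rewrite author's own statement) =====
-- stated objective: alternative
-- what changed: Replaces A's incremental dict of mutable edge sets (setdefault priming plus pairwise combinations additions per scope) by a staged computation: one pass collects the variables, then each variable's neighbour set is built independently by a comprehension scanning all scopes containing it.
import Mathlib
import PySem

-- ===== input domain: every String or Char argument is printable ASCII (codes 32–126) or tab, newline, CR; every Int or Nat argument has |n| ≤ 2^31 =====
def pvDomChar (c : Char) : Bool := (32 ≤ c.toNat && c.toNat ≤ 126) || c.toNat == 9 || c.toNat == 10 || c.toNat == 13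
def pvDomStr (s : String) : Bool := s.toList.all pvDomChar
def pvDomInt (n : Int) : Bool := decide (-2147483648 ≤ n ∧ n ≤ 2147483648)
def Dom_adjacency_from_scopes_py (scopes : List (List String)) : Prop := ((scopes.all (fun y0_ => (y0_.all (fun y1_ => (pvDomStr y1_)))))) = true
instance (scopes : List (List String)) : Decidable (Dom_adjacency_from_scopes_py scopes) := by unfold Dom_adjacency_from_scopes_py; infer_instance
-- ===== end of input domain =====

-- B replaces A's incremental dict of mutable edge sets by a staged computation: one pass collects
-- the variables, then each variable's neighbour set is built independently by a comprehension
-- scanning the scopes that contain it (alternative decomposition, comparable cost).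


-- ===== PORT A =====
-- itertools.combinations(scope, 2): all pairs (scope[i], scope[j]) with i < j, in order.
def pvCombos2 : List String → List (String × String)
  | [] => []
  | x :: xs => xs.map (fun y => (x, y)) ++ pvCombos2 xs

-- `adjacency[left].add(right); adjacency[right].add(left)`.  `adjacency[k].add(x)` is modify with
-- default ∅ — exact here because A has just setdefault'ed every scope member into the dict.
def pvEdgeAdd (a : PySem.Dict String (PySem.Set String)) (p : String × String) :
    PySem.Dict String (PySem.Set String) :=
  (a.modify p.1 PySem.Set.empty (fun s => PySem.Set.add s p.2)).modify p.2 PySem.Set.empty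
    (fun s => PySem.Set.add s p.1)

-- one iteration of A's `for scope in scopes` body; the set-typed element `scope` is decoded with
-- Set.ofList (an inner list stands for the Python set of its elements, in first-occurrence order)
def pvStepA (adjacency : PySem.Dict String (PySem.Set String)) (scope0 : List String) :
    PySem.Dict String (PySem.Set String) :=
  let scope : PySem.Set String := PySem.Set.ofList scope0
  let adjacency := scope.foldl (fun a v => a.setdefault v PySem.Set.empty) adjacency
  (pvCombos2 scope).foldl pvEdgeAdd adjacency

def adjacency_from_scopes_py (scopes : List (List String)) : List (String × List String) :=
  (scopes.foldl pvStepA PySem.Dict.empty).items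

-- ===== PORT B =====
-- `dict.fromkeys(v for scope in scopes for v in scope)`: first occurrences, in generator order
def pvVarsB (scopes : List (List String)) : List String :=
  PySem.List.dedup (scopes.flatMap (fun s => (PySem.Set.ofList s : List String)))

-- `{u for s in scopes if v in s for u in s if u != v}`: the set of the generated elements, in order
def pvNeighborsB (scopes : List (List String)) (v : String) : PySem.Set String :=
  PySem.Set.ofList
    ((scopes.filter (fun s => PySem.Set.contains (PySem.Set.ofList s) v)).flatMap
      (fun s => (PySem.Set.ofList s : List String).filter (fun u => u ≠ v)))

def adjacency_from_scopes_py_alt (scopes : List (List String)) : List (String × List String) :=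
  (pvVarsB scopes).map (fun v => (v, pvNeighborsB scopes v))

-- ===== PRECONDITION & SPEC =====
def Spec_adjacency_from_scopes_py (scopes : List (List String)) (out : List (String × List String)) : Prop := out = adjacency_from_scopes_py_alt scopes
instance (scopes : List (List String)) (out : List (String × List String)) : Decidable (Spec_adjacency_from_scopes_py scopes out) := by unfold Spec_adjacency_from_scopes_py; infer_instance

-- ===== CLAIM (what is proved, stated in full; the proofs are below) =====
def Claim_equal_adjacency_from_scopes_py : Prop := ∀ (scopes : List (List String)), Dom_adjacency_from_scopes_py scopes → Spec_adjacency_from_scopes_py scopes (adjacency_from_scopes_py scopes)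

-- ===== LEMMAS AND PROOFS =====

-- every pair produced by pvCombos2 has both components in the source list
lemma mem_pvCombos2 (s : List String) (p : String × String) (hp : p ∈ pvCombos2 s) :
    p.1 ∈ s ∧ p.2 ∈ s := by
  induction s with
  | nil => simp [pvCombos2] at hp
  | cons x xs ih =>
    simp only [pvCombos2, List.mem_append, List.mem_map] at hp
    rcases hp with ⟨y, hy, rfl⟩ | hp
    · exact ⟨List.mem_cons_self, List.mem_cons_of_mem _ hy⟩
    · exact ⟨List.mem_cons_of_mem _ (ih hp).1, List.mem_cons_of_mem _ (ih hp).2⟩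

-- A's priming loop: keys become d.keys updated with scope
lemma keys_foldl_setdefault (scope : List String) (d : PySem.Dict String (PySem.Set String)) :
    (scope.foldl (fun a v => a.setdefault v PySem.Set.empty) d).keys =
      PySem.Set.update d.keys scope := by
  induction scope generalizing d with
  | nil => simp [PySem.Set.update_nil]
  | cons v vs ih =>
    rw [List.foldl_cons, ih, PySem.Set.update_cons]
    congr 1
    rw [PySem.Dict.keys_setdefault, PySem.Set.add_eq_ite, PySem.Dict.contains_eq_decide_mem_keys]
    split_ifs with h h' h' <;> simp_all

-- A's priming loop changes no value (the default is the inserted value ∅)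
lemma getD_foldl_setdefault (scope : List String) (d : PySem.Dict String (PySem.Set String))
    (k : String) :
    (scope.foldl (fun a v => a.setdefault v PySem.Set.empty) d).getD k PySem.Set.empty =
      d.getD k PySem.Set.empty := by
  induction scope generalizing d with
  | nil => rfl
  | cons v vs ih =>
    rw [List.foldl_cons, ih]
    by_cases h : k = v
    · subst h; exact PySem.Dict.getD_setdefault_self d k _ _
    · rw [PySem.Dict.getD_eq_get?_getD, PySem.Dict.get?_setdefault_of_ne d _ h,
        ← PySem.Dict.getD_eq_get?_getD]

-- pvEdgeAdd never removes keys; it keeps them unchanged when both components are present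
lemma keys_foldl_pvEdgeAdd (pairs : List (String × String))
    (e : PySem.Dict String (PySem.Set String))
    (h : ∀ p ∈ pairs, p.1 ∈ e.keys ∧ p.2 ∈ e.keys) :
    (pairs.foldl pvEdgeAdd e).keys = e.keys := by
  induction pairs generalizing e with
  | nil => rfl
  | cons p ps ih =>
    have h1 := (h p (List.mem_cons_self)).1
    have h2 := (h p (List.mem_cons_self)).2
    have hk : (pvEdgeAdd e p).keys = e.keys := by
      unfold pvEdgeAdd
      rw [PySem.Dict.keys_modify, PySem.Dict.keys_insert_of_contains _ _
          ((PySem.Dict.contains_iff_mem_keys _ _).2 (by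
            rw [PySem.Dict.keys_modify, PySem.Dict.keys_insert_of_contains _ _
              ((PySem.Dict.contains_iff_mem_keys _ _).2 h1)]; exact h2)),
        PySem.Dict.keys_modify, PySem.Dict.keys_insert_of_contains _ _
          ((PySem.Dict.contains_iff_mem_keys _ _).2 h1)]
    rw [List.foldl_cons, ih (pvEdgeAdd e p) (fun q hq => by
      rw [hk]; exact h q (List.mem_cons_of_mem _ hq)), hk]

-- the star block of A's pair loop: all pairs (v, r), r ∈ rest
lemma getD_foldl_star (v : String) (rest : List String)
    (e : PySem.Dict String (PySem.Set String)) (hv : v ∉ rest) (hnd : rest.Nodup) (k : String) :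
    ((rest.map (fun y => (v, y))).foldl pvEdgeAdd e).getD k PySem.Set.empty =
      if k = v then PySem.Set.update (e.getD v PySem.Set.empty) rest
      else if k ∈ rest then PySem.Set.add (e.getD k PySem.Set.empty) v
      else e.getD k PySem.Set.empty := by
  induction rest generalizing e with
  | nil =>
    simp only [List.map_nil, List.foldl_nil, List.not_mem_nil, if_false]
    split_ifs with h
    · subst h; rw [PySem.Set.update_nil]
    · rfl
  | cons r rs ih =>
    have hvr : v ≠ r := fun h => hv (h ▸ List.mem_cons_self)
    have hvrs : v ∉ rs := fun h => hv (List.mem_cons_of_mem _ h)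
    have hrrs : r ∉ rs := (List.nodup_cons.1 hnd).1
    rw [List.map_cons, List.foldl_cons, ih _ hvrs (List.nodup_cons.1 hnd).2]
    have hgd : ∀ j, (pvEdgeAdd e (v, r)).getD j PySem.Set.empty =
        if j = v then PySem.Set.add (e.getD v PySem.Set.empty) r
        else if j = r then PySem.Set.add (e.getD r PySem.Set.empty) v
        else e.getD j PySem.Set.empty := by
      intro j
      by_cases hjv : j = v
      · subst hjv; simp [pvEdgeAdd, PySem.Dict.getD_modify, hvr]
      · by_cases hjr : j = r
        · subst hjr; simp [pvEdgeAdd, PySem.Dict.getD_modify, hjv]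
        · simp [pvEdgeAdd, PySem.Dict.getD_modify, hjv, hjr]
    by_cases hkv : k = v
    · subst hkv
      rw [if_pos rfl, if_pos rfl, hgd, if_pos rfl, PySem.Set.update_cons]
    · rw [if_neg hkv, if_neg hkv]
      by_cases hkr : k = r
      · subst hkr
        rw [if_neg (by exact hrrs), if_pos List.mem_cons_self, hgd, if_neg hkv, if_pos rfl]
      · by_cases hkrs : k ∈ rs
        · rw [if_pos hkrs, if_pos (List.mem_cons_of_mem _ hkrs), hgd, if_neg hkv, if_neg hkr]
        · rw [if_neg hkrs, if_neg (by simp [hkr, hkrs]), hgd, if_neg hkv, if_neg hkr]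

-- A's whole pair loop: each scope member k accumulates scope-minus-k, in scope order
lemma getD_foldl_combos (scope : List String) (e : PySem.Dict String (PySem.Set String))
    (hnd : scope.Nodup) (k : String) :
    ((pvCombos2 scope).foldl pvEdgeAdd e).getD k PySem.Set.empty =
      if k ∈ scope then
        PySem.Set.update (e.getD k PySem.Set.empty) (scope.filter (fun y => y ≠ k))
      else e.getD k PySem.Set.empty := by
  induction scope generalizing e with
  | nil => simp [pvCombos2]
  | cons v rest ih =>
    have hv : v ∉ rest := (List.nodup_cons.1 hnd).1
    have hrest : rest.Nodup := (List.nodup_cons.1 hnd).2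
    rw [pvCombos2, List.foldl_append,
      ih ((rest.map (fun y => (v, y))).foldl pvEdgeAdd e) hrest]
    by_cases hkr : k ∈ rest
    · have hkv : k ≠ v := fun h => hv (h ▸ hkr)
      rw [if_pos hkr, if_pos (List.mem_cons_of_mem _ hkr),
        getD_foldl_star v rest e hv hrest k, if_neg hkv, if_pos hkr,
        List.filter_cons_of_pos (by simp [Ne.symm hkv]), ← PySem.Set.update_cons]
    · rw [if_neg hkr, getD_foldl_star v rest e hv hrest k]
      by_cases hkv : k = v
      · subst hkv
        rw [if_pos rfl, if_pos List.mem_cons_self, List.filter_cons_of_neg (by simp),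
          List.filter_eq_self.2 (fun y hy => by simp; exact fun h => hv (h ▸ hy))]
      · simp [hkv, hkr]

-- Set.update over a concatenation splits
lemma update_append (s : PySem.Set String) (xs ys : List String) :
    PySem.Set.update s (xs ++ ys) = PySem.Set.update (PySem.Set.update s xs) ys := by
  simp [PySem.Set.update, List.foldl_append]

-- keys of A's dict after one scope step
lemma keys_stepA (d : PySem.Dict String (PySem.Set String)) (s : List String) :
    (pvStepA d s).keys = PySem.Set.update d.keys (PySem.Set.ofList s) := by
  show ((pvCombos2 (PySem.Set.ofList s)).foldl pvEdgeAdd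
    ((PySem.Set.ofList s).foldl (fun a v => a.setdefault v PySem.Set.empty) d)).keys = _
  rw [keys_foldl_pvEdgeAdd _ _ (fun p hp => by
      rw [keys_foldl_setdefault]
      exact ⟨(PySem.Set.mem_update _ _ _).2
               (Or.inr (mem_pvCombos2 (PySem.Set.ofList s) p hp).1),
             (PySem.Set.mem_update _ _ _).2
               (Or.inr (mem_pvCombos2 (PySem.Set.ofList s) p hp).2)⟩),
    keys_foldl_setdefault]

-- keys of A's final dict: one big update with the concatenation of all scopes (as sets)
lemma keys_foldl_stepA (scopes : List (List String)) (d : PySem.Dict String (PySem.Set String)) :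
    (scopes.foldl pvStepA d).keys =
      PySem.Set.update d.keys (scopes.flatMap (fun s => (PySem.Set.ofList s : List String))) := by
  induction scopes generalizing d with
  | nil => simp [PySem.Set.update_nil]
  | cons s ss ih =>
    rw [List.foldl_cons, ih, keys_stepA, List.flatMap_cons, update_append]

-- value of A's dict at any key k after one scope step
lemma getD_stepA (d : PySem.Dict String (PySem.Set String)) (s : List String) (k : String) :
    (pvStepA d s).getD k PySem.Set.empty =
      if k ∈ (PySem.Set.ofList s : List String) then
        PySem.Set.update (d.getD k PySem.Set.empty)
          ((PySem.Set.ofList s : List String).filter (fun y => y ≠ k))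
      else d.getD k PySem.Set.empty := by
  show ((pvCombos2 (PySem.Set.ofList s)).foldl pvEdgeAdd
    ((PySem.Set.ofList s).foldl (fun a v => a.setdefault v PySem.Set.empty) d)).getD
      k PySem.Set.empty = _
  rw [getD_foldl_combos _ _ (PySem.Set.nodup_ofList s) k, getD_foldl_setdefault]

-- value of A's final dict at any key k: one big update with the concatenation of the per-scope
-- contributions (scope-minus-k for each scope containing k)
lemma getD_foldl_stepA (scopes : List (List String)) (d : PySem.Dict String (PySem.Set String))
    (k : String) :
    (scopes.foldl pvStepA d).getD k PySem.Set.empty =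
      PySem.Set.update (d.getD k PySem.Set.empty)
        (scopes.flatMap (fun s =>
          if k ∈ (PySem.Set.ofList s : List String) then
            (PySem.Set.ofList s : List String).filter (fun y => y ≠ k)
          else [])) := by
  induction scopes generalizing d with
  | nil => simp [PySem.Set.update_nil]
  | cons s ss ih =>
    rw [List.foldl_cons, ih, getD_stepA, List.flatMap_cons, update_append]
    by_cases h : k ∈ (PySem.Set.ofList s : List String)
    · rw [if_pos h, if_pos h]
    · rw [if_neg h, if_neg h, PySem.Set.update_nil]

-- filtering the scope list first equals pushing the condition inside the flatMap
lemma flatMap_filter_eq_ite (p : List String → Bool) (f : List String → List String)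
    (scopes : List (List String)) :
    (scopes.filter p).flatMap f = scopes.flatMap (fun s => if p s then f s else []) := by
  induction scopes with
  | nil => rfl
  | cons s ss ih =>
    by_cases h : p s = true
    · rw [List.filter_cons_of_pos h, List.flatMap_cons, List.flatMap_cons, if_pos h, ih]
    · rw [List.filter_cons_of_neg h, List.flatMap_cons,
        if_neg h, List.nil_append, ih]

-- B's neighbour set equals A's accumulated value at k (both start from the empty set)
lemma neighbors_eq (scopes : List (List String)) (k : String) :
    pvNeighborsB scopes k =
      PySem.Set.update PySem.Set.empty
        (scopes.flatMap (fun s =>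
          if k ∈ (PySem.Set.ofList s : List String) then
            (PySem.Set.ofList s : List String).filter (fun y => y ≠ k)
          else [])) := by
  unfold pvNeighborsB
  rw [flatMap_filter_eq_ite]
  congr 1
  refine List.flatMap_congr (fun s _ => ?_)
  by_cases h : k ∈ (PySem.Set.ofList s : List String)
  · rw [if_pos h, if_pos ((PySem.Set.contains_iff _ _).2 h)]
  · rw [if_neg h, if_neg (by simpa using fun hc => h ((PySem.Set.contains_iff _ _).1 hc))]

-- ===== VERDICT (by name: the statement is the Claim_ definition above) =====
theorem adjacency_from_scopes_py_spec : Claim_equal_adjacency_from_scopes_py := by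
  intro scopes _
  show adjacency_from_scopes_py scopes = adjacency_from_scopes_py_alt scopes
  unfold adjacency_from_scopes_py adjacency_from_scopes_py_alt
  have hkeys : (scopes.foldl pvStepA PySem.Dict.empty).keys = pvVarsB scopes := by
    rw [keys_foldl_stepA]
    unfold pvVarsB
    rw [PySem.List.dedup_eq_ofList]
    rfl
  have hnd : (scopes.foldl pvStepA PySem.Dict.empty).keys.Nodup := by
    rw [hkeys]; unfold pvVarsB; exact PySem.List.nodup_dedup _
  rw [PySem.Dict.items_eq_map_keys _ hnd PySem.Set.empty, hkeys]
  refine List.map_congr_left (fun k _ => ?_)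
  rw [getD_foldl_stepA, neighbors_eq]
  rfl
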